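-- pv_equiv track=rewrite | github.com/sammylton/DSA | 2 Data Structures/network_simulation.py | process_packets
-- ===== SOURCE A (Python) =====
-- from collections import deque
--
-- def process_packets(size, packets):
--     finish_times = deque()
--     result = []
--
--     for arrival, duration in packets:
--         while finish_times and finish_times[0] <= arrival:
--             finish_times.popleft()
--
--         if len(finish_times) == size:
--             result.append(-1)
--         else:
--             start = arrival if not finish_times else finish_times[-1]
--             finish_times.append(start + duration)
--             result.append(start)
--
--     return result
-- ===== SOURCE B (Python) =====
-- def process_packets(size, packets):
--     # Sorted array of ALL accepted finish times (never popped) + a monotone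
--     # 'left' pointer; expiry by binary search instead of front-popping.
--     finish_times = []
--     left = 0
--     result = []
--     for arrival, duration in packets:
--         # binary search: first index k in [left, len) with finish_times[k] > arrival
--         lo, hi = left, len(finish_times)
--         while lo < hi:
--             mid = (lo + hi) // 2
--             if finish_times[mid] <= arrival:
--                 lo = mid + 1
--             else:
--                 hi = mid
--         left = lo
--         active = len(finish_times) - left
--         if active == size:
--             result.append(-1)
--         else:
--             start = arrival if active == 0 else finish_times[-1]
--             finish_times.append(start + duration)
--             result.append(start)
--     return result
-- ===== Notes on version B (the rewrite author's own statement) =====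
-- stated objective: alternative
-- what changed: The deque of pending finish times and its per-packet front-popping while loop are replaced by a never-popped sorted array of all accepted finish times plus a monotone left pointer advanced by hand-written binary search (O(log n) expiry step instead of repeated popleft).
-- outside the precondition, e.g. on process_packets(3, [(0, 10), (0, -5), (7, 1)]): A returns [0, 10, 5], B returns [0, 10, 7]
import Mathlib
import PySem

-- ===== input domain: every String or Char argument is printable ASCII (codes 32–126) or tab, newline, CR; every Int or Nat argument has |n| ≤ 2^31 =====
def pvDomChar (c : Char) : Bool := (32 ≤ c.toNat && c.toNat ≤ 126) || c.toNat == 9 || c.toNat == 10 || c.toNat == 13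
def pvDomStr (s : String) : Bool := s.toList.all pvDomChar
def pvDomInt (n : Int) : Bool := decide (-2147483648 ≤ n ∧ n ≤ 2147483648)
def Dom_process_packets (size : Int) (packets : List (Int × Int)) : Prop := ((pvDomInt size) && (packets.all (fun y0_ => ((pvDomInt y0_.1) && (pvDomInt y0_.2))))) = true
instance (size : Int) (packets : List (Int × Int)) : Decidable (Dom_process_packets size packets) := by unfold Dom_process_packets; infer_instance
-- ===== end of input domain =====

-- B replaces the deque's front-popping while loop by a never-popped sorted array of all
-- accepted finish times plus a monotone left pointer advanced by binary search
-- (objective: alternative algorithm; equivalence proved on nonnegative durations).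

-- ===== PORT A =====
-- 'while finish_times and finish_times[0] <= arrival: finish_times.popleft()'
def popLoop (arrival : Int) : List Int → List Int
  | [] => []
  | f :: rest => if f ≤ arrival then popLoop arrival rest else f :: rest

def stepA (size : Int) (st : List Int × List Int) (p : Int × Int) : List Int × List Int :=
  let q := popLoop p.1 st.1
  if (q.length : Int) = size then (q, st.2 ++ [-1])
  else
    -- start = arrival if not finish_times else finish_times[-1]
    let start := (q.getLast?).getD p.1
    (q ++ [start + p.2], st.2 ++ [start])

def process_packets (size : Int) (packets : List (Int × Int)) : List Int :=
  (packets.foldl (stepA size) ([], [])).2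

-- ===== PORT B =====
-- hand-written binary search of Source B: first index k in [lo, hi) with fs[k] > a
-- (fs.getD mid 0 is exact here: mid < hi ≤ fs.length on every probe Source B makes)
-- fuel = hi - lo bounds the iteration count (the half-open range shrinks strictly each step)
def bsearchGo (fs : List Int) (a : Int) : Nat → Nat → Nat → Nat
  | lo, _, 0 => lo
  | lo, hi, fuel + 1 =>
    if lo < hi then
      if fs.getD ((lo + hi) / 2) 0 ≤ a then bsearchGo fs a ((lo + hi) / 2 + 1) hi fuel
      else bsearchGo fs a lo ((lo + hi) / 2) fuel
    else lo

def bsearch (fs : List Int) (a : Int) (lo hi : Nat) : Nat :=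
  bsearchGo fs a lo hi (hi - lo)

def stepB (size : Int) (st : List Int × Nat × List Int) (p : Int × Int) : List Int × Nat × List Int :=
  let left := bsearch st.1 p.1 st.2.1 st.1.length
  let active := st.1.length - left
  if (active : Int) = size then (st.1, left, st.2.2 ++ [-1])
  else
    -- start = arrival if active == 0 else finish_times[-1]  (finish_times nonempty there)
    let start := if active = 0 then p.1 else (st.1.getLast?).getD 0
    (st.1 ++ [start + p.2], left, st.2.2 ++ [start])

def process_packets_alt (size : Int) (packets : List (Int × Int)) : List Int :=
  (packets.foldl (stepB size) ([], 0, [])).2.2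

-- ===== PRECONDITION & SPEC =====
-- Pre_ restricts to the natural domain of nonnegative processing durations; with a negative
-- duration the pending-finish window is unsorted, so A's linear front-popping and B's binary
-- search legitimately differ (see claim.json cites).
def Pre_process_packets (size : Int) (packets : List (Int × Int)) : Prop :=
  ∀ p ∈ packets, 0 ≤ p.2
instance (size : Int) (packets : List (Int × Int)) : Decidable (Pre_process_packets size packets) := by
  unfold Pre_process_packets; infer_instance

def pvWitness_process_packets : Int × (List (Int × Int)) := (2, [(1, 3), (2, 2), (3, 1), (10, 2)])

def Spec_process_packets (size : Int) (packets : List (Int × Int)) (out : List Int) : Prop := out = process_packets_alt size packets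
instance (size : Int) (packets : List (Int × Int)) (out : List Int) : Decidable (Spec_process_packets size packets out) := by unfold Spec_process_packets; infer_instance

-- ===== CLAIM (what is proved, stated in full; the proofs are below) =====
def Claim_equal_process_packets : Prop := ∀ (size : Int) (packets : List (Int × Int)), Dom_process_packets size packets → Pre_process_packets size packets → Spec_process_packets size packets (process_packets size packets)

-- ===== LEMMAS AND PROOFS =====

-- the suffix fs.drop k is nondecreasing, stated on indices
def MonoFrom (fs : List Int) (k : Nat) : Prop :=
  ∀ i j, k ≤ i → i ≤ j → j < fs.length → fs.getD i 0 ≤ fs.getD j 0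

-- A-state ↔ B-state: the deque is the suffix of the full array past the pointer
def QRel (st : List Int × List Int) (st' : List Int × Nat × List Int) : Prop :=
  st.1 = st'.1.drop st'.2.1 ∧ st.2 = st'.2.2 ∧ st'.2.1 ≤ st'.1.length ∧ MonoFrom st'.1 st'.2.1

lemma bsearchGo_spec (fs : List Int) (a : Int) :
    ∀ (n lo hi : Nat), hi - lo ≤ n → lo ≤ hi → hi ≤ fs.length →
      (∀ i j, lo ≤ i → i ≤ j → j < hi → fs.getD i 0 ≤ fs.getD j 0) →
      lo ≤ bsearchGo fs a lo hi n ∧ bsearchGo fs a lo hi n ≤ hi ∧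
      (∀ i, lo ≤ i → i < bsearchGo fs a lo hi n → fs.getD i 0 ≤ a) ∧
      (∀ i, bsearchGo fs a lo hi n ≤ i → i < hi → a < fs.getD i 0) := by
  intro n
  induction n with
  | zero =>
      intro lo hi h0 hlh _ _
      simp only [bsearchGo]
      exact ⟨le_refl _, hlh, fun i h1 h2 => by omega, fun i h1 h2 => by omega⟩
  | succ n ih =>
      intro lo hi h0 hlh hhi hm
      rw [bsearchGo]
      by_cases hlt : lo < hi
      · simp only [hlt, if_true]
        set mid := (lo + hi) / 2 with hmid
        have hmlo : lo ≤ mid := by omega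
        have hmhi : mid < hi := by omega
        by_cases hc : fs.getD mid 0 ≤ a
        · simp only [hc, if_true]
          obtain ⟨b1, b2, b3, b4⟩ := ih (mid + 1) hi (by omega) (by omega) hhi
            (fun i j hi1 hi2 hi3 => hm i j (by omega) hi2 hi3)
          refine ⟨by omega, b2, fun i h1 h2 => ?_, b4⟩
          by_cases hcase : mid + 1 ≤ i
          · exact b3 i hcase h2
          · exact le_trans (hm i mid h1 (by omega) hmhi) hc
        · simp only [hc, if_false]
          obtain ⟨b1, b2, b3, b4⟩ := ih lo mid (by omega) (by omega) (by omega)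
            (fun i j hi1 hi2 hi3 => hm i j hi1 hi2 (by omega))
          refine ⟨b1, by omega, b3, fun i h1 h2 => ?_⟩
          by_cases hcase : i < mid
          · exact b4 i h1 hcase
          · exact lt_of_not_ge (fun hle => hc (le_trans (hm mid i hmlo (by omega) h2) hle))
      · simp only [hlt, if_false]
        exact ⟨le_refl _, hlh, fun i h1 h2 => by omega, fun i h1 h2 => by omega⟩

lemma bsearch_spec (fs : List Int) (a : Int) (lo hi : Nat) (hlh : lo ≤ hi)
    (hhi : hi ≤ fs.length)
    (hm : ∀ i j, lo ≤ i → i ≤ j → j < hi → fs.getD i 0 ≤ fs.getD j 0) :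
    lo ≤ bsearch fs a lo hi ∧ bsearch fs a lo hi ≤ hi ∧
    (∀ i, lo ≤ i → i < bsearch fs a lo hi → fs.getD i 0 ≤ a) ∧
    (∀ i, bsearch fs a lo hi ≤ i → i < hi → a < fs.getD i 0) :=
  bsearchGo_spec fs a (hi - lo) lo hi (le_refl _) hlh hhi hm

lemma popLoop_drop (fs : List Int) (a : Int) :
    ∀ (n lo k : Nat), k - lo ≤ n → lo ≤ k → k ≤ fs.length →
      (∀ i, lo ≤ i → i < k → fs.getD i 0 ≤ a) →
      (k < fs.length → a < fs.getD k 0) →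
      popLoop a (fs.drop lo) = fs.drop k := by
  intro n
  induction n with
  | zero =>
      intro lo k h0 hlk hk hle hgt
      have he : lo = k := by omega
      subst he
      by_cases hlen : lo < fs.length
      · rw [List.drop_eq_getElem_cons hlen, popLoop]
        have := hgt hlen
        rw [List.getD_eq_getElem fs 0 hlen] at this
        simp [not_le.mpr this, ← List.drop_eq_getElem_cons hlen]
      · rw [List.drop_eq_nil_of_le (by omega : fs.length ≤ lo)]
        rfl
  | succ n ih =>
      intro lo k h0 hlk hk hle hgt
      by_cases he : lo = k
      · exact ih lo k (by omega) (by omega) hk hle hgt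
      · have hlen : lo < fs.length := by omega
        rw [List.drop_eq_getElem_cons hlen, popLoop]
        have h1 : fs.getD lo 0 ≤ a := hle lo (le_refl _) (by omega)
        rw [List.getD_eq_getElem fs 0 hlen] at h1
        simp only [h1, if_true]
        exact ih (lo + 1) k (by omega) (by omega) hk (fun i hi1 hi2 => hle i (by omega) hi2) hgt

lemma getD_last (fs : List Int) (h : 0 < fs.length) (d : Int) :
    (fs.getLast?).getD d = fs.getD (fs.length - 1) 0 := by
  rw [List.getLast?_eq_getElem?, List.getD_eq_getElem?_getD]
  rw [List.getElem?_eq_getElem (by omega)]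
  rfl

lemma step_rel (size : Int) (p : Int × Int) (st : List Int × List Int)
    (st' : List Int × Nat × List Int) (hdur : 0 ≤ p.2) (h : QRel st st') :
    QRel (stepA size st p) (stepB size st' p) := by
  obtain ⟨fs, left, res⟩ := st'
  obtain ⟨hq, hr, hle, hm⟩ := h
  obtain ⟨b1, b2, b3, b4⟩ := bsearch_spec fs p.1 left fs.length hle (le_refl _) hm
  set k := bsearch fs p.1 left fs.length with hk
  have hpop : popLoop p.1 (fs.drop left) = fs.drop k :=
    popLoop_drop fs p.1 k left k (by omega) b1 b2
      (fun i h1 h2 => b3 i h1 h2) (fun hlen => b4 k (le_refl _) hlen)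
  have hmk : MonoFrom fs k := fun i j h1 h2 hj => hm i j (le_trans b1 h1) h2 hj
  simp only [stepA, stepB, hq, hr, hpop, ← hk, List.length_drop]
  by_cases hc : ((fs.length - k : Nat) : Int) = size
  · simp only [hc, if_true]
    exact ⟨rfl, rfl, b2, hmk⟩
  · simp only [hc, if_false]
    by_cases hz : fs.length - k = 0
    · -- active = 0: the window is empty, start = arrival on both sides
      have hkl : k = fs.length := by omega
      have hdk : fs.drop k = [] := List.drop_eq_nil_of_le (by omega)
      simp only [hz, hdk, if_true, List.getLast?_nil, Option.getD_none, List.nil_append]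
      refine ⟨?_, rfl, by show k ≤ (fs ++ _).length; simp; omega, ?_⟩
      · show [p.1 + p.2] = List.drop k (fs ++ [p.1 + p.2])
        rw [List.drop_append_of_le_length (by omega), hdk, List.nil_append]
      · show MonoFrom (fs ++ [p.1 + p.2]) k
        intro i j h1 h2 hj
        simp only [List.length_append, List.length_cons, List.length_nil] at hj
        have hi' : i = fs.length := by omega
        have hj' : j = fs.length := by omega
        rw [hi', hj']
    · -- active > 0: start = last finish time on both sides
      have hkl : k < fs.length := by omega
      have hne : 0 < (fs.drop k).length := by rw [List.length_drop]; omega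
      have hst : ((fs.drop k).getLast?).getD p.1 = (fs.getLast?).getD 0 := by
        rw [getD_last _ hne, getD_last _ (by omega : 0 < fs.length)]
        rw [List.getD_eq_getElem?_getD, List.getD_eq_getElem?_getD, List.getElem?_drop]
        have he : k + ((fs.drop k).length - 1) = fs.length - 1 := by
          rw [List.length_drop]; omega
        rw [he]
      simp only [hz, if_false, hst]
      set x := (fs.getLast?).getD 0 + p.2 with hx
      refine ⟨?_, rfl, ?_, ?_⟩
      · show List.drop k fs ++ _ = List.drop k (fs ++ _)
        rw [List.drop_append_of_le_length (by omega)]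
      · show k ≤ (fs ++ [x]).length
        simp only [List.length_append, List.length_cons, List.length_nil]; omega
      · show MonoFrom (fs ++ [x]) k
        intro i j h1 h2 hj
        simp only [List.length_append, List.length_cons, List.length_nil] at hj
        have hlast : (fs.getLast?).getD 0 = fs.getD (fs.length - 1) 0 := getD_last _ (by omega) 0
        by_cases hje : j < fs.length
        · rw [List.getD_append _ _ _ _ (by omega), List.getD_append _ _ _ _ (by omega)]
          exact hmk i j h1 h2 hje
        · have hj' : j = fs.length := by omega
          have hxj : (fs ++ [x]).getD j 0 = x := by subst hj'; simp [hx]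
          rw [hxj]
          by_cases hie : i < fs.length
          · rw [List.getD_append _ _ _ _ (by omega), hx, hlast]
            have := hmk i (fs.length - 1) h1 (by omega) (by omega)
            omega
          · have hi' : i = fs.length := by omega
            have hxi : (fs ++ [x]).getD i 0 = x := by subst hi'; simp [hx]
            rw [hxi]

lemma fold_rel (size : Int) (packets : List (Int × Int))
    (hpre : ∀ p ∈ packets, 0 ≤ p.2) :
    ∀ (st : List Int × List Int) (st' : List Int × Nat × List Int), QRel st st' →
      (packets.foldl (stepA size) st).2 = (packets.foldl (stepB size) st').2.2 := by
  induction packets with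
  | nil => intro st st' h; exact h.2.1
  | cons p rest ih =>
      intro st st' h
      simp only [List.foldl_cons]
      exact ih (fun q hq => hpre q (List.mem_cons_of_mem _ hq))
        _ _ (step_rel size p st st' (hpre p (List.mem_cons_self)) h)

-- ===== VERDICT (by name: the statement is the Claim_ definition above) =====
theorem process_packets_spec : Claim_equal_process_packets := by
  intro size packets _hdom hpre
  unfold Spec_process_packets process_packets process_packets_alt
  exact fold_rel size packets hpre ([], []) ([], 0, [])
    ⟨rfl, rfl, Nat.zero_le _, fun i j _ _ hj => by simp at hj⟩
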